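-- pv_equiv track=rewrite | github.com/iveney/google-foobar | save_beta_rabbit.py | answer
-- ===== SOURCE A (Python) =====
-- def answer(food, grid):
--     ROW = len(grid)
--     COL = len(grid[0])
--     prev_grids = [(0, -1), (-1, 0)]
--     remain = []
--     for y in range(ROW):
--         remain.append([set() for x in range(COL)])
--         for x in range(COL):
--             if x == 0 and y == 0:
--                 remain[y][x] = set([food])
--                 continue
--
--             remain[y][x] = set()
--             for dy, dx in prev_grids:
--                 nx = x + dx
--                 ny = y + dy
--                 if nx >= 0 and nx < COL and ny >= 0 and ny < ROW:
--                     prev_remain = remain[ny][nx]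
--                 else:
--                     prev_remain = set()
--
--                 cur_remain = set()
--                 for v in prev_remain:
--                     r = v - grid[y][x]
--                     if r >= 0:
--                         cur_remain.add(r)
--
--                 remain[y][x] |= cur_remain
--
--
--     final = remain[ROW-1][COL-1]
--     if len(final) > 0:
--         return min(final)
--     else:
--         return -1
-- ===== SOURCE B (Python) =====
-- def answer(food, grid):
--     ROW, COL = len(grid), len(grid[0])
--     memo = {}
--
--     def reach(y, x):
--         if (y, x) in memo:
--             return memo[(y, x)]
--         if y == 0 and x == 0:
--             res = {food}
--         else:
--             c = grid[y][x]
--             res = set()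
--             if x > 0:
--                 res |= {v - c for v in reach(y, x - 1) if v - c >= 0}
--             if y > 0:
--                 res |= {v - c for v in reach(y - 1, x) if v - c >= 0}
--         memo[(y, x)] = res
--         return res
--
--     final = reach(ROW - 1, COL - 1)
--     return min(final) if final else -1
-- ===== Notes on version B (the rewrite author's own statement) =====
-- stated objective: alternative
-- what changed: Replaces the bottom-up full remain-table construction (explicit list-of-lists of sets with index arithmetic over predecessor offsets) by a top-down memoized recursion reach(y,x) on the cell coordinates.
-- outside the precondition, e.g. on answer(0, [[0, 5], [5]]): A returns -1, B raises IndexError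
import Mathlib
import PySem

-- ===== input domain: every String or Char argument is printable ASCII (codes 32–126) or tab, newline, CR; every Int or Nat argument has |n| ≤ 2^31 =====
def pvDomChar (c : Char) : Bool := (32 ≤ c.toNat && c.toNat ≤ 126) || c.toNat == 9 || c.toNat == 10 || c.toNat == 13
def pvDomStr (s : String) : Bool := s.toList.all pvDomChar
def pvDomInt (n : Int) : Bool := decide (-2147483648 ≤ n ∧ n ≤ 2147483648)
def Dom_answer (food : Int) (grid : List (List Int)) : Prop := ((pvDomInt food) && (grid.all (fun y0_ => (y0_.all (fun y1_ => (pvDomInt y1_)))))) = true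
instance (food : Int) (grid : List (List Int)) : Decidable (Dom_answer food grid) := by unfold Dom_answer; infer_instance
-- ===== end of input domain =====

-- B rewrites A's bottom-up remain-table construction as a top-down memoized recursion on cell coordinates; equal cost, different decomposition.

-- ===== PORT A =====
-- remain[ny][nx] (Python double indexing, in-range under Pre_)
def pvGetCell (remain : List (List (PySem.Set Int))) (ny nx : Int) : PySem.Set Int :=
  PySem.List.pyGetD (PySem.List.pyGetD remain ny []) nx PySem.Set.empty

-- remain[y][x] = s (Python assignment into the nested list)
def pvSetCell (remain : List (List (PySem.Set Int))) (y x : Int) (s : PySem.Set Int) : List (List (PySem.Set Int)) :=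
  PySem.List.pySetD remain y (PySem.List.pySetD (PySem.List.pyGetD remain y []) x s)

def answer (food : Int) (grid : List (List Int)) : Int :=
  let ROW : Int := grid.length
  let COL : Int := ((PySem.List.pyGet? grid 0).getD []).length
  let prev_grids : List (Int × Int) := [(0, -1), (-1, 0)]
  let remain : List (List (PySem.Set Int)) :=
    (PySem.List.pyRange 0 ROW 1).foldl (fun remain y =>
      let remain := remain ++ [(PySem.List.pyRange 0 COL 1).map (fun _ => (PySem.Set.empty : PySem.Set Int))]
      (PySem.List.pyRange 0 COL 1).foldl (fun remain x =>
        if x == 0 && y == 0 then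
          pvSetCell remain y x (PySem.Set.ofList [food])
        else
          let remain := pvSetCell remain y x PySem.Set.empty
          prev_grids.foldl (fun remain d =>
            let nx := x + d.2
            let ny := y + d.1
            let prev_remain :=
              if nx ≥ 0 && nx < COL && ny ≥ 0 && ny < ROW then pvGetCell remain ny nx
              else PySem.Set.empty
            let cur_remain : PySem.Set Int :=
              prev_remain.foldl (fun cur v =>
                let r := v - PySem.List.pyGetD (PySem.List.pyGetD grid y []) x 0
                if r ≥ 0 then PySem.Set.add cur r else cur) PySem.Set.empty
            pvSetCell remain y x (PySem.Set.union (pvGetCell remain y x) cur_remain)) remain) remain) []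
  let final := pvGetCell remain (ROW - 1) (COL - 1)
  if final.length > 0 then
    match PySem.List.min? final (fun v => v) with
    | some m => m
    | none => -1
  else -1

-- ===== PORT B =====
-- {v - c for v in s if v - c >= 0} : a set comprehension over the set s
def pvStep (c : Int) (s : PySem.Set Int) : PySem.Set Int :=
  s.foldl (fun cur v => if v - c ≥ 0 then PySem.Set.add cur (v - c) else cur) PySem.Set.empty

-- memoized reach(y, x): set of remaining-food values at cell (y, x)
def pvReach (food : Int) (grid : List (List Int)) (y x : Nat) : PySem.Set Int :=
  if y = 0 ∧ x = 0 then PySem.Set.ofList [food]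
  else
    let c := PySem.List.pyGetD (PySem.List.pyGetD grid (y : Int) []) (x : Int) 0
    let res : PySem.Set Int := PySem.Set.empty
    let res := if _hx : x > 0 then PySem.Set.union res (pvStep c (pvReach food grid y (x - 1))) else res
    if _hy : y > 0 then PySem.Set.union res (pvStep c (pvReach food grid (y - 1) x)) else res
  termination_by y + x
  decreasing_by all_goals omega

def answer_alt (food : Int) (grid : List (List Int)) : Int :=
  let ROW := grid.length
  let COL := (grid.headD []).length
  let final := pvReach food grid (ROW - 1) (COL - 1)
  if final = [] then -1
  else
    match PySem.List.min? final (fun v => v) with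
    | some m => m
    | none => -1

-- ===== PRECONDITION & SPEC =====
-- Pre_ excludes the empty grid and grids whose first row is empty (A raises IndexError there) and
-- non-rectangular grids with some row shorter than the first (A raises IndexError on them except in the
-- rare case that every path dies before reaching a missing cell, where it returns -1 but B raises).
def Pre_answer (food : Int) (grid : List (List Int)) : Prop :=
  grid ≠ [] ∧ 0 < (grid.headD []).length ∧ ∀ row ∈ grid, (grid.headD []).length ≤ row.length
instance (food : Int) (grid : List (List Int)) : Decidable (Pre_answer food grid) := by unfold Pre_answer; infer_instance

def pvWitness_answer : Int × List (List Int) := (7, [[0, 2, 5], [3, 1, 1]])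

def Spec_answer (food : Int) (grid : List (List Int)) (out : Int) : Prop := out = answer_alt food grid
instance (food : Int) (grid : List (List Int)) (out : Int) : Decidable (Spec_answer food grid out) := by unfold Spec_answer; infer_instance

-- ===== CLAIM (what is proved, stated in full; the proofs are below) =====
def Claim_equal_answer : Prop := ∀ (food : Int) (grid : List (List Int)), Dom_answer food grid → Pre_answer food grid → Spec_answer food grid (answer food grid)

-- ===== LEMMAS AND PROOFS =====

-- The row of the remain table A is building, with the first k cells already filled in
def pvTblRow (food : Int) (grid : List (List Int)) (C y k : Nat) : List (PySem.Set Int) :=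
  (List.range C).map (fun j => if j < k then pvReach food grid y j else PySem.Set.empty)

-- The fully built first y rows of A's remain table
def pvTbl (food : Int) (grid : List (List Int)) (C y : Nat) : List (List (PySem.Set Int)) :=
  (List.range y).map (fun i => (List.range C).map (fun j => pvReach food grid i j))

-- A's remain table while row y is being processed: y full rows plus the partial row
def pvSt (food : Int) (grid : List (List Int)) (C y k : Nat) : List (List (PySem.Set Int)) :=
  pvTbl food grid C y ++ [pvTblRow food grid C y k]

-- one iteration of A's loop over prev_grids, named for the proofs (definitionally the port's lambda)
def pvDStep (grid : List (List Int)) (ROW COL y x : Int)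
    (remain : List (List (PySem.Set Int))) (d : Int × Int) : List (List (PySem.Set Int)) :=
  let nx := x + d.2
  let ny := y + d.1
  let prev_remain :=
    if nx ≥ 0 && nx < COL && ny ≥ 0 && ny < ROW then pvGetCell remain ny nx
    else PySem.Set.empty
  let cur_remain : PySem.Set Int :=
    prev_remain.foldl (fun cur v =>
      let r := v - PySem.List.pyGetD (PySem.List.pyGetD grid y []) x 0
      if r ≥ 0 then PySem.Set.add cur r else cur) PySem.Set.empty
  pvSetCell remain y x (PySem.Set.union (pvGetCell remain y x) cur_remain)

-- the inner (per-x) loop body of A's port, named for the proofs (definitionally the port's lambda)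
def pvInner (food : Int) (grid : List (List Int)) (ROW COL : Int) (y : Int)
    (remain : List (List (PySem.Set Int))) (x : Int) : List (List (PySem.Set Int)) :=
  if x == 0 && y == 0 then
    pvSetCell remain y x (PySem.Set.ofList [food])
  else
    let remain := pvSetCell remain y x PySem.Set.empty
    ([(0, -1), (-1, 0)] : List (Int × Int)).foldl (pvDStep grid ROW COL y x) remain

-- the outer (per-y) loop body of A's port
def pvOuter (food : Int) (grid : List (List Int)) (ROW COL : Int)
    (remain : List (List (PySem.Set Int))) (y : Int) : List (List (PySem.Set Int)) :=
  (PySem.List.pyRange 0 COL).foldl (pvInner food grid ROW COL y)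
    (remain ++ [(PySem.List.pyRange 0 COL).map (fun _ => (PySem.Set.empty : PySem.Set Int))])

lemma answer_eq_named (food : Int) (grid : List (List Int)) :
    answer food grid =
      (let ROW : Int := grid.length
       let COL : Int := ((PySem.List.pyGet? grid 0).getD []).length
       let remain := (PySem.List.pyRange 0 ROW).foldl (pvOuter food grid ROW COL) []
       let final := pvGetCell remain (ROW - 1) (COL - 1)
       if final.length > 0 then
         match PySem.List.min? final (fun v => v) with
         | some m => m
         | none => -1
       else -1) := rfl

lemma pvReach_zero (food : Int) (grid : List (List Int)) :
    pvReach food grid 0 0 = PySem.Set.ofList [food] := by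
  rw [pvReach]; simp

lemma pvTbl_length (food : Int) (grid : List (List Int)) (C y : Nat) :
    (pvTbl food grid C y).length = y := by simp [pvTbl]

lemma pvTblRow_full (food : Int) (grid : List (List Int)) (C y : Nat) :
    pvTblRow food grid C y C = (List.range C).map (fun j => pvReach food grid y j) := by
  unfold pvTblRow
  apply List.map_congr_left
  intro j hj
  simp [List.mem_range.mp hj]

lemma pvTblRow_set_self (food : Int) (grid : List (List Int)) (C y k : Nat) :
    (pvTblRow food grid C y k).set k PySem.Set.empty = pvTblRow food grid C y k := by
  apply List.ext_getElem
  · simp [pvTblRow]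
  · intro i h1 h2
    simp only [pvTblRow, List.getElem_set, List.getElem_map, List.getElem_range] at *
    split_ifs with h3 h4 <;> simp_all

lemma pvTblRow_set_succ (food : Int) (grid : List (List Int)) (C y k : Nat) (_hk : k < C) :
    (pvTblRow food grid C y k).set k (pvReach food grid y k) = pvTblRow food grid C y (k + 1) := by
  apply List.ext_getElem
  · simp [pvTblRow]
  · intro i h1 h2
    simp only [pvTblRow, List.getElem_set, List.getElem_map, List.getElem_range] at *
    split_ifs with h3 h4 h5 <;> simp_all <;> omega

-- reading a cell of the partial row
lemma pvGetCell_row (food : Int) (grid : List (List Int)) (C y : Nat)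
    (ρ : List (PySem.Set Int)) (j : Nat) :
    pvGetCell (pvTbl food grid C y ++ [ρ]) (y : Int) (j : Int) = ρ.getD j PySem.Set.empty := by
  simp [pvGetCell, PySem.List.pyGetD_natCast, pvTbl_length, List.getD]

-- reading a cell of an already completed row i < y
lemma pvGetCell_tbl (food : Int) (grid : List (List Int)) (C y : Nat)
    (ρ : List (PySem.Set Int)) (i j : Nat) (hi : i < y) (hj : j < C) :
    pvGetCell (pvTbl food grid C y ++ [ρ]) (i : Int) (j : Int) = pvReach food grid i j := by
  have h1 : (pvTbl food grid C y ++ [ρ])[i]? = some ((List.range C).map (fun j => pvReach food grid i j)) := by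
    rw [List.getElem?_append_left (by simp [pvTbl_length]; omega)]
    simp [pvTbl, List.getElem?_map, List.getElem?_range hi]
  simp [pvGetCell, PySem.List.pyGetD_natCast, List.getD, h1, List.getElem?_map,
    List.getElem?_range hj]

-- writing the cell (y, k)
lemma pvSetCell_row (food : Int) (grid : List (List Int)) (C y k : Nat)
    (ρ : List (PySem.Set Int)) (v : PySem.Set Int) :
    pvSetCell (pvTbl food grid C y ++ [ρ]) (y : Int) (k : Int) v
      = pvTbl food grid C y ++ [ρ.set k v] := by
  simp [pvSetCell, PySem.List.pySetD_natCast, PySem.List.pyGetD_natCast,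
    pvTbl_length, List.getD, List.set_append_right]

-- grid[y][x], as both ports read it
def pvC (grid : List (List Int)) (y x : Int) : Int :=
  PySem.List.pyGetD (PySem.List.pyGetD grid y []) x 0

lemma pvReach_of_ne (food : Int) (grid : List (List Int)) (y x : Nat) (h : ¬(y = 0 ∧ x = 0)) :
    pvReach food grid y x =
      (let c := pvC grid (y : Int) (x : Int)
       let res := if x > 0 then PySem.Set.union PySem.Set.empty (pvStep c (pvReach food grid y (x - 1)))
                  else PySem.Set.empty
       if y > 0 then PySem.Set.union res (pvStep c (pvReach food grid (y - 1) x)) else res) := by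
  rw [pvReach, if_neg h]
  simp [pvC]

lemma pvGetCell_row_self (food : Int) (grid : List (List Int)) (C y k : Nat) :
    pvGetCell (pvSt food grid C y k) (y : Int) (k : Int) = PySem.Set.empty := by
  unfold pvSt
  rw [pvGetCell_row]
  unfold pvTblRow
  rcases Nat.lt_or_ge k C with h | h
  · rw [PySem.List.getD_map_range _ _ _ _ h]
    simp
  · rw [List.getD_eq_default _ _ (by simpa using h)]

lemma pvDStep_left (food : Int) (grid : List (List Int)) (R C y k : Nat)
    (hy : y < R) (hk : k < C) :
    pvDStep grid (R : Int) (C : Int) (y : Int) (k : Int) (pvSt food grid C y k) (0, -1)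
      = pvTbl food grid C y ++ [(pvTblRow food grid C y k).set k
          (if k > 0 then
            PySem.Set.union PySem.Set.empty (pvStep (pvC grid (y : Int) (k : Int)) (pvReach food grid y (k - 1)))
           else PySem.Set.empty)] := by
  simp only [pvDStep]
  by_cases hk0 : k > 0
  · rw [if_pos hk0]
    have h2 : (k : Int) + -1 = ((k - 1 : Nat) : Int) := by omega
    split
    · next hcond =>
      rw [h2, show ((y : Int) + 0) = ((y : Nat) : Int) from by ring]
      have hg : pvGetCell (pvSt food grid C y k) ((y : Nat) : Int) ((k - 1 : Nat) : Int)
          = pvReach food grid y (k - 1) := by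
        unfold pvSt
        rw [pvGetCell_row]
        unfold pvTblRow
        rw [PySem.List.getD_map_range _ _ _ _ (show k - 1 < C by omega)]
        rw [if_pos (by omega)]
      rw [hg, pvGetCell_row_self]
      rw [show pvSt food grid C y k = pvTbl food grid C y ++ [pvTblRow food grid C y k] from rfl]
      rw [pvSetCell_row]
      simp only [pvStep, pvC]
    · next hcond =>
      exfalso
      simp at hcond
      omega
  · rw [if_neg hk0]
    split
    · next hcond =>
      exfalso
      simp at hcond
      omega
    · rw [pvGetCell_row_self]
      rw [show pvSt food grid C y k = pvTbl food grid C y ++ [pvTblRow food grid C y k] from rfl]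
      rw [pvSetCell_row]
      rfl

lemma pvDStep_up (food : Int) (grid : List (List Int)) (R C y k : Nat)
    (hy : y < R) (hk : k < C) (V : PySem.Set Int) :
    pvDStep grid (R : Int) (C : Int) (y : Int) (k : Int)
        (pvTbl food grid C y ++ [(pvTblRow food grid C y k).set k V]) (-1, 0)
      = pvTbl food grid C y ++ [(pvTblRow food grid C y k).set k
          (if y > 0 then
            PySem.Set.union V (pvStep (pvC grid (y : Int) (k : Int)) (pvReach food grid (y - 1) k))
           else V)] := by
  simp only [pvDStep]
  have hgV : pvGetCell (pvTbl food grid C y ++ [(pvTblRow food grid C y k).set k V])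
      ((y : Nat) : Int) ((k : Nat) : Int) = V := by
    rw [pvGetCell_row]
    simp [pvTblRow, List.getD, hk]
  by_cases hy0 : y > 0
  · rw [if_pos hy0]
    have h2 : (y : Int) + -1 = ((y - 1 : Nat) : Int) := by omega
    split
    · next hcond =>
      rw [h2, show ((k : Int) + 0) = ((k : Nat) : Int) from by ring]
      rw [pvGetCell_tbl food grid C y _ (y - 1) k (by omega) hk]
      rw [hgV, pvSetCell_row, List.set_set]
      simp only [pvStep, pvC]
    · next hcond =>
      exfalso
      simp at hcond
      omega
  · rw [if_neg hy0]
    split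
    · next hcond =>
      exfalso
      simp at hcond
      omega
    · rw [hgV, pvSetCell_row, List.set_set]
      rfl

-- one inner step fills in cell (y, k) with pvReach y k
lemma pvInner_step (food : Int) (grid : List (List Int)) (R C y k : Nat)
    (hy : y < R) (hk : k < C) :
    pvInner food grid (R : Int) (C : Int) (y : Int) (pvSt food grid C y k) (k : Int)
      = pvSt food grid C y (k + 1) := by
  unfold pvInner
  by_cases h0 : y = 0 ∧ k = 0
  · obtain ⟨hy0, hk0⟩ := h0
    subst hy0; subst hk0
    rw [if_pos (by simp)]
    rw [show pvSt food grid C 0 0 = pvTbl food grid C 0 ++ [pvTblRow food grid C 0 0] from rfl]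
    rw [pvSetCell_row, ← pvReach_zero food grid, pvTblRow_set_succ food grid C 0 0 hk]
    rfl
  · rw [if_neg (by simp; omega)]
    have e1 : pvSetCell (pvSt food grid C y k) ((y : Nat) : Int) ((k : Nat) : Int) PySem.Set.empty
        = pvSt food grid C y k := by
      rw [show pvSt food grid C y k = pvTbl food grid C y ++ [pvTblRow food grid C y k] from rfl]
      rw [pvSetCell_row, pvTblRow_set_self]
    simp only [List.foldl_cons, List.foldl_nil]
    rw [e1, pvDStep_left food grid R C y k hy hk, pvDStep_up food grid R C y k hy hk]
    rw [show pvSt food grid C y (k + 1) = pvTbl food grid C y ++ [pvTblRow food grid C y (k + 1)] from rfl]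
    rw [← pvTblRow_set_succ food grid C y k hk]
    congr 2
    rw [pvReach_of_ne food grid y k h0]

-- the inner loop fills the whole row
lemma pvInner_fold (food : Int) (grid : List (List Int)) (R C y : Nat) (hy : y < R)
    (m : Nat) (hm : m ≤ C) :
    (List.range m).foldl
        (fun st (j : Nat) => pvInner food grid (R : Int) (C : Int) (y : Int) st (j : Int))
        (pvSt food grid C y 0)
      = pvSt food grid C y m := by
  induction m with
  | zero => simp
  | succ n ih =>
    rw [List.range_succ, List.foldl_append, ih (by omega)]
    simpa using pvInner_step food grid R C y n hy (by omega)

lemma pvOuter_step (food : Int) (grid : List (List Int)) (R C y : Nat) (hy : y < R) :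
    pvOuter food grid (R : Int) (C : Int) (pvTbl food grid C y) (y : Int)
      = pvTbl food grid C (y + 1) := by
  unfold pvOuter
  rw [PySem.List.pyRange_zero_natCast, List.foldl_map]
  have h0 : List.map (fun _ => (PySem.Set.empty : PySem.Set Int))
      (List.map (fun k => ((k : Nat) : Int)) (List.range C)) = pvTblRow food grid C y 0 := by
    simp [pvTblRow, List.map_const', List.eq_replicate_iff]
  rw [h0]
  rw [show pvTbl food grid C y ++ [pvTblRow food grid C y 0] = pvSt food grid C y 0 from rfl]
  rw [pvInner_fold food grid R C y hy C le_rfl]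
  simp [pvSt, pvTbl, pvTblRow_full, List.range_succ]

lemma pvOuter_fold (food : Int) (grid : List (List Int)) (R C : Nat)
    (m : Nat) (hm : m ≤ R) :
    (List.range m).foldl
        (fun st (i : Nat) => pvOuter food grid (R : Int) (C : Int) st (i : Int)) []
      = pvTbl food grid C m := by
  induction m with
  | zero => simp [pvTbl]
  | succ n ih =>
    rw [List.range_succ, List.foldl_append, ih (by omega)]
    simpa using pvOuter_step food grid R C n (by omega)

lemma pvGetCell_tbl_full (food : Int) (grid : List (List Int)) (R C i j : Nat)
    (hi : i < R) (hj : j < C) :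
    pvGetCell (pvTbl food grid C R) (i : Int) (j : Int) = pvReach food grid i j := by
  unfold pvGetCell pvTbl
  rw [PySem.List.pyGetD_natCast, PySem.List.pyGetD_natCast]
  rw [PySem.List.getD_map_range _ _ _ _ hi, PySem.List.getD_map_range _ _ _ _ hj]

-- ===== VERDICT (by name: the statement is the Claim_ definition above) =====
theorem answer_spec : Claim_equal_answer := by
  intro food grid _hdom hpre
  obtain ⟨hne, hC, _hrect⟩ := hpre
  unfold Spec_answer
  have hR : 0 < grid.length := List.length_pos_iff.mpr hne
  rw [answer_eq_named]
  have hcol : ((PySem.List.pyGet? grid 0).getD []).length = (grid.headD []).length := by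
    cases grid with
    | nil => exact absurd rfl hne
    | cons a l => simp [PySem.List.pyGet?, PySem.List.pyIdx?]
  simp only [hcol]
  rw [PySem.List.pyRange_zero_natCast grid.length, List.foldl_map]
  rw [pvOuter_fold food grid grid.length (grid.headD []).length grid.length le_rfl]
  rw [show ((grid.length : Int) - 1) = ((grid.length - 1 : Nat) : Int) from by omega]
  rw [show (((grid.headD []).length : Int) - 1) = (((grid.headD []).length - 1 : Nat) : Int) from by omega]
  rw [pvGetCell_tbl_full food grid grid.length (grid.headD []).length _ _ (by omega) (by omega)]
  unfold answer_alt
  simp only [List.headD_eq_head?_getD]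
  cases pvReach food grid (grid.length - 1) ((grid.head?.getD []).length - 1) with
  | nil => simp
  | cons a l => simp
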